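-- pv_equiv track=rewrite | github.com/Mae-Avadiaev/Algos-and-DS-python | Advanced Algorithms and Complexity/Stock Charts - Google Code Jam.py | make_connections
-- ===== SOURCE A (Python) =====
-- def make_connections(adj_matrix, stock_data):
--     less_matrix = []
--     count = -1
--     for i in range(len(stock_data)):
--         for k in range(len(stock_data)):
--             if i != k:
--                 less_matrix.append([(i, k)])
--                 count += 1
--             else:
--                 continue
--             for j in range(len(stock_data[i])):
--                 if stock_data[i][j] < stock_data[k][j]:
--                     less_matrix[count].append(1)
--                 else:
--                     less_matrix[count].append(0)
--     for l in less_matrix: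
--         if 0 not in l:
--             a, b = l[0]
--             b += len(stock_data)
--             adj_matrix[a][b] = 1
--     return adj_matrix
-- ===== SOURCE B (Python) =====
-- def make_connections(adj_matrix, stock_data):
--     n = len(stock_data)
--     # candidate elimination: start with every ordered pair, then sweep the
--     # columns, each column killing the pairs it contradicts
--     cand = [(i, k) for i in range(n) for k in range(n) if i != k]
--     cols = len(stock_data[0]) if stock_data else 0
--     for j in range(cols):
--         cand = [(i, k) for (i, k) in cand
--                 if stock_data[i][j] < stock_data[k][j]]
--     for i, k in cand:
--         adj_matrix[i][k + n] = 1
--     return adj_matrix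
-- ===== Notes on version B (the rewrite author's own statement) =====
-- stated objective: alternative
-- what changed: Replaces A's per-pair bit-list build-then-rescan with column-major candidate elimination: start from the list of all ordered pairs and sweep the columns, each column filtering out the pairs it contradicts, then mark the survivors; the data is traversed column-by-column instead of pair-by-pair.
import Mathlib
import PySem

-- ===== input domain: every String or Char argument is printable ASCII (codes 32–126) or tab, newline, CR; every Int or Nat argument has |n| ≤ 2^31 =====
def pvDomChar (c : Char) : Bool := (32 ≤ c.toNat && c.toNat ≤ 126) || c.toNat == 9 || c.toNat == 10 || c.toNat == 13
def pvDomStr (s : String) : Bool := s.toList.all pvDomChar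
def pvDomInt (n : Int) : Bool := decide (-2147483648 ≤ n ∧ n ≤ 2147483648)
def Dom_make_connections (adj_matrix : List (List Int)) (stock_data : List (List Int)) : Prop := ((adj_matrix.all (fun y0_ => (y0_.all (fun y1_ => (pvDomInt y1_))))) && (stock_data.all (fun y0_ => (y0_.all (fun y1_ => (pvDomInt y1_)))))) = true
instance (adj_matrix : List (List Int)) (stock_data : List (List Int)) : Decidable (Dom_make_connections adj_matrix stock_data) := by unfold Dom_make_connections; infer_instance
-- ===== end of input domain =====

-- B replaces A's per-pair bit-list build-then-rescan with column-major candidate elimination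
-- (objective: alternative). Equivalence is about the RETURN value; the Python A mutates
-- adj_matrix in place and the Python B performs the same mutation.

-- ===== PORT A =====
-- one iteration of A's inner k-loop body, over the state (less_matrix, count)
def pvStepA (stock_data : List (List Int)) (i k : Nat)
    (st : List ((Nat × Nat) × List Int) × Int) : List ((Nat × Nat) × List Int) × Int :=
  if i = k then st
  else
    let less := st.1 ++ [((i, k), ([] : List Int))]
    let count := st.2 + 1
    let less :=
      (List.range (stock_data.getD i []).length).foldl
        (fun less j =>
          less.modify count.toNat (fun e =>
            (e.1, e.2 ++ [if (stock_data.getD i []).getD j 0 < (stock_data.getD k []).getD j 0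
                          then (1 : Int) else 0])))
        less
    (less, count)

def make_connections (adj_matrix : List (List Int)) (stock_data : List (List Int)) : List (List Int) :=
  let st := (List.range stock_data.length).foldl
      (fun st i => (List.range stock_data.length).foldl (fun st k => pvStepA stock_data i k st) st)
      (([] : List ((Nat × Nat) × List Int)), (-1 : Int))
  st.1.foldl
    (fun adj l =>
      if (0 : Int) ∈ l.2 then adj
      else adj.modify l.1.1 (fun row => row.set (l.1.2 + stock_data.length) 1))
    adj_matrix

-- ===== PORT B =====
-- len(stock_data[0]) if stock_data else 0
def pvCols (stock_data : List (List Int)) : Nat :=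
  match stock_data with | [] => 0 | r :: _ => r.length

def make_connections_alt (adj_matrix : List (List Int)) (stock_data : List (List Int)) : List (List Int) :=
  let n := stock_data.length
  let cand := (List.range n).flatMap
      (fun i => (List.range n).flatMap (fun k => if i ≠ k then [(i, k)] else []))
  let cols := pvCols stock_data
  let cand := (List.range cols).foldl
      (fun cand j => cand.filter
        (fun p => decide ((stock_data.getD p.1 []).getD j 0 < (stock_data.getD p.2 []).getD j 0)))
      cand
  cand.foldl (fun adj p => adj.modify p.1 (fun row => row.set (p.2 + n) 1)) adj_matrix

-- ===== PRECONDITION & SPEC =====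
-- Python A raises IndexError exactly when the stock rows differ in length (the j-loop reads
-- row k at the indices of row i) or when a fired edge (i, k + n) falls outside adj_matrix's
-- shape; Pre_ excludes exactly those inputs.
def Pre_make_connections (adj_matrix : List (List Int)) (stock_data : List (List Int)) : Prop :=
  (∀ r1 ∈ stock_data, ∀ r2 ∈ stock_data, r1.length = r2.length) ∧
  (∀ i < stock_data.length, ∀ k < stock_data.length, i ≠ k →
    (∀ j < (stock_data.getD i []).length,
      (stock_data.getD i []).getD j 0 < (stock_data.getD k []).getD j 0) →
    i < adj_matrix.length ∧ k + stock_data.length < (adj_matrix.getD i []).length)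
instance (adj_matrix : List (List Int)) (stock_data : List (List Int)) : Decidable (Pre_make_connections adj_matrix stock_data) := by unfold Pre_make_connections; infer_instance

def pvWitness_make_connections : List (List Int) × List (List Int) :=
  ([[0, 0, 0, 0], [0, 0, 0, 0]], [[1], [2]])

def Spec_make_connections (adj_matrix : List (List Int)) (stock_data : List (List Int)) (out : List (List Int)) : Prop := out = make_connections_alt adj_matrix stock_data
instance (adj_matrix : List (List Int)) (stock_data : List (List Int)) (out : List (List Int)) : Decidable (Spec_make_connections adj_matrix stock_data out) := by unfold Spec_make_connections; infer_instance

-- ===== CLAIM (what is proved, stated in full; the proofs are below) =====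
def Claim_equal_make_connections : Prop := ∀ (adj_matrix : List (List Int)) (stock_data : List (List Int)), Dom_make_connections adj_matrix stock_data → Pre_make_connections adj_matrix stock_data → Spec_make_connections adj_matrix stock_data (make_connections adj_matrix stock_data)

-- ===== LEMMAS AND PROOFS =====

-- the bits A records for the pair (i, k)
def pvBits (stock_data : List (List Int)) (i k : Nat) : List Int :=
  (List.range (stock_data.getD i []).length).map
    (fun j => if (stock_data.getD i []).getD j 0 < (stock_data.getD k []).getD j 0
              then (1 : Int) else 0)

-- the record(s) one (i, k) iteration appends to less_matrix
def pvSel (stock_data : List (List Int)) (i k : Nat) : List ((Nat × Nat) × List Int) :=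
  if i = k then [] else [((i, k), pvBits stock_data i k)]

lemma modify_last {α : Type} (xs : List α) (e : α) (f : α → α) :
    (xs ++ [e]).modify xs.length f = xs ++ [f e] := by
  induction xs with
  | nil => simp [List.modify]
  | cons a t ih => simpa [List.modify] using ih

lemma inner_fold (stock_data : List (List Int)) (i k : Nat)
    (xs : List ((Nat × Nat) × List Int)) (p : Nat × Nat) (b : List Int) (m : Nat) :
    (List.range m).foldl
      (fun less j =>
        less.modify xs.length (fun e =>
          (e.1, e.2 ++ [if (stock_data.getD i []).getD j 0 < (stock_data.getD k []).getD j 0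
                        then (1 : Int) else 0])))
      (xs ++ [(p, b)])
    = xs ++ [(p, b ++ (List.range m).map
        (fun j => if (stock_data.getD i []).getD j 0 < (stock_data.getD k []).getD j 0
                  then (1 : Int) else 0))] := by
  induction m generalizing b with
  | zero => simp
  | succ m ih =>
      rw [List.range_succ, List.foldl_append, ih, List.foldl_cons, List.foldl_nil,
        modify_last, List.map_append]
      simp

lemma stepA_eq (stock_data : List (List Int)) (i k : Nat)
    (st : List ((Nat × Nat) × List Int) × Int) (h : st.2 = (st.1.length : Int) - 1) :
    pvStepA stock_data i k st
    = (st.1 ++ pvSel stock_data i k, ((st.1 ++ pvSel stock_data i k).length : Int) - 1) := by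
  obtain ⟨less, count⟩ := st
  simp only at h
  subst h
  by_cases hik : i = k
  · simp [pvStepA, pvSel, hik]
  · simp only [pvStepA, pvSel, if_neg hik]
    have hcount : ((less.length : Int) - 1 + 1).toNat = less.length := by omega
    rw [hcount, inner_fold]
    simp [pvBits]

lemma kfold_eq (stock_data : List (List Int)) (i : Nat) (ks : List Nat)
    (st : List ((Nat × Nat) × List Int) × Int) (h : st.2 = (st.1.length : Int) - 1) :
    ks.foldl (fun st k => pvStepA stock_data i k st) st
    = (st.1 ++ ks.flatMap (pvSel stock_data i),
       ((st.1 ++ ks.flatMap (pvSel stock_data i)).length : Int) - 1) := by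
  induction ks generalizing st with
  | nil => simp [Prod.ext_iff, h]
  | cons k ks ih =>
      rw [List.foldl_cons, stepA_eq _ _ _ _ h, ih _ (by simp)]
      simp

lemma ifold_eq (stock_data : List (List Int)) (is : List Nat) (n : Nat)
    (st : List ((Nat × Nat) × List Int) × Int) (h : st.2 = (st.1.length : Int) - 1) :
    is.foldl (fun st i => (List.range n).foldl (fun st k => pvStepA stock_data i k st) st) st
    = (st.1 ++ is.flatMap (fun i => (List.range n).flatMap (pvSel stock_data i)),
       ((st.1 ++ is.flatMap (fun i => (List.range n).flatMap (pvSel stock_data i))).length : Int) - 1) := by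
  induction is generalizing st with
  | nil => simp [Prod.ext_iff, h]
  | cons i is ih =>
      rw [List.foldl_cons, kfold_eq _ _ _ _ h, ih _ (by simp)]
      simp

lemma foldl_flatMap' {α β γ : Type} (l : List α) (f : α → List β) (g : γ → β → γ) (a : γ) :
    (l.flatMap f).foldl g a = l.foldl (fun a x => (f x).foldl g a) a := by
  induction l generalizing a with
  | nil => rfl
  | cons x l ih => rw [List.flatMap_cons, List.foldl_append, List.foldl_cons, ih]

lemma zero_mem_bits (stock_data : List (List Int)) (i k : Nat) :
    ((0 : Int) ∈ pvBits stock_data i k)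
    ↔ ¬ ((List.range (stock_data.getD i []).length).all
        (fun j => decide ((stock_data.getD i []).getD j 0 < (stock_data.getD k []).getD j 0)) = true) := by
  simp only [pvBits, List.mem_map, List.all_eq_true, not_forall, decide_eq_true_eq]
  constructor
  · rintro ⟨j, hj, hval⟩
    refine ⟨j, ⟨hj, fun hlt => ?_⟩⟩
    rw [if_pos hlt] at hval
    exact one_ne_zero hval
  · rintro ⟨j, hj, hval⟩
    exact ⟨j, hj, if_neg hval⟩

lemma sel_fold (stock_data : List (List Int)) (n : Nat) (i k : Nat) (adj : List (List Int)) :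
    (pvSel stock_data i k).foldl
      (fun adj l =>
        if (0 : Int) ∈ l.2 then adj
        else adj.modify l.1.1 (fun row => row.set (l.1.2 + n) 1)) adj
    = (if (i != k) && (List.range (stock_data.getD i []).length).all
          (fun j => decide ((stock_data.getD i []).getD j 0 < (stock_data.getD k []).getD j 0))
       then adj.modify i (fun row => row.set (k + n) 1)
       else adj) := by
  by_cases hik : i = k
  · simp [pvSel, hik]
  · simp only [pvSel, if_neg hik, List.foldl_cons, List.foldl_nil]
    by_cases hz : (0 : Int) ∈ pvBits stock_data i k
    · rw [if_pos hz, if_neg]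
      simp only [Bool.and_eq_true, bne_iff_ne, ne_eq, not_and]
      intro _
      exact (zero_mem_bits stock_data i k).mp hz
    · rw [if_neg hz, if_pos]
      simp only [Bool.and_eq_true, bne_iff_ne, ne_eq]
      refine ⟨hik, ?_⟩
      by_contra h
      exact hz ((zero_mem_bits stock_data i k).mpr h)

-- A in nested-fold normal form
lemma portA_eq (adj_matrix stock_data : List (List Int)) :
    make_connections adj_matrix stock_data
    = (List.range stock_data.length).foldl
        (fun adj i => (List.range stock_data.length).foldl
          (fun adj k =>
            if (i != k) && (List.range (stock_data.getD i []).length).all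
                (fun j => decide ((stock_data.getD i []).getD j 0 < (stock_data.getD k []).getD j 0))
            then adj.modify i (fun row => row.set (k + stock_data.length) 1)
            else adj)
          adj)
        adj_matrix := by
  unfold make_connections
  rw [ifold_eq stock_data _ _ _ (by simp)]
  simp only [List.nil_append]
  rw [foldl_flatMap']
  apply PySem.List.foldl_congr_mem
  intro adj i _
  rw [foldl_flatMap']
  apply PySem.List.foldl_congr_mem
  intro adj k _
  exact sel_fold stock_data stock_data.length i k adj

-- B-side: successive column filters = one filter by the conjunction over all columns
lemma filter_fold {α : Type} (q : Nat → α → Bool) (m : Nat) (cand : List α) :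
    (List.range m).foldl (fun c j => c.filter (q j)) cand
    = cand.filter (fun p => (List.range m).all (fun j => q j p)) := by
  induction m with
  | zero => simp
  | succ m ih =>
      rw [List.range_succ, List.foldl_append, ih, List.foldl_cons, List.foldl_nil,
        List.filter_filter]
      apply List.filter_congr
      intro p _
      rw [List.all_append]
      simp [Bool.and_comm]

-- folding over a filtered list = folding with the filter as a guard
lemma foldl_filter' {α γ : Type} (q : α → Bool) (g : γ → α → γ) (l : List α) (a : γ) :
    (l.filter q).foldl g a = l.foldl (fun a x => if q x then g a x else a) a := by
  induction l generalizing a with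
  | nil => rfl
  | cons x l ih =>
      by_cases hx : q x = true
      · rw [List.filter_cons_of_pos hx, List.foldl_cons, List.foldl_cons, if_pos hx, ih]
      · rw [List.filter_cons_of_neg hx, List.foldl_cons,
          if_neg hx, ih]

-- B in nested-fold normal form
lemma portB_eq (adj_matrix stock_data : List (List Int)) :
    make_connections_alt adj_matrix stock_data
    = (List.range stock_data.length).foldl
        (fun adj i => (List.range stock_data.length).foldl
          (fun adj k =>
            if (i != k) &&
               (List.range (pvCols stock_data)).all
                 (fun j => decide ((stock_data.getD i []).getD j 0 < (stock_data.getD k []).getD j 0))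
            then adj.modify i (fun row => row.set (k + stock_data.length) 1)
            else adj)
          adj)
        adj_matrix := by
  unfold make_connections_alt
  simp only []
  rw [filter_fold, foldl_filter', foldl_flatMap']
  apply PySem.List.foldl_congr_mem
  intro adj i _
  rw [foldl_flatMap']
  apply PySem.List.foldl_congr_mem
  intro adj k _
  by_cases hik : i = k
  · simp [hik]
  · simp only [ne_eq, hik, not_false_eq_true, if_true, List.foldl_cons, List.foldl_nil,
      bne_iff_ne, Bool.and_eq_true]
    by_cases hall : (List.range (pvCols stock_data)).all
        (fun j => decide ((stock_data.getD i []).getD j 0 < (stock_data.getD k []).getD j 0)) = true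
    · rw [if_pos hall, if_pos ⟨trivial, hall⟩]
    · rw [if_neg hall, if_neg (fun h => hall h.2)]

-- under Pre_ every row has the first row's length
lemma row_len_eq (stock_data : List (List Int))
    (hlen : ∀ r1 ∈ stock_data, ∀ r2 ∈ stock_data, r1.length = r2.length)
    (i : Nat) (hi : i < stock_data.length) :
    (stock_data.getD i []).length
    = (pvCols stock_data) := by
  cases stock_data with
  | nil => simp at hi
  | cons r rs =>
      have hmem : (r :: rs).getD i [] ∈ r :: rs := by
        rw [List.getD_eq_getElem _ _ hi]
        exact List.getElem_mem hi
      simp only [pvCols]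
      exact hlen _ hmem r (by simp)

lemma ports_eq (adj_matrix stock_data : List (List Int))
    (hlen : ∀ r1 ∈ stock_data, ∀ r2 ∈ stock_data, r1.length = r2.length) :
    make_connections adj_matrix stock_data = make_connections_alt adj_matrix stock_data := by
  rw [portA_eq, portB_eq]
  apply PySem.List.foldl_congr_mem
  intro adj i hi
  apply PySem.List.foldl_congr_mem
  intro adj k _
  rw [row_len_eq stock_data hlen i (List.mem_range.mp hi)]

-- ===== VERDICT (by name: the statement is the Claim_ definition above) =====
theorem make_connections_spec : Claim_equal_make_connections := by
  intro adj stock _ hpre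
  exact ports_eq adj stock hpre.1
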